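-- pv_equiv track=rewrite | github.com/Thorid/Advent-of-Code-2017 | AoC 2017 Day6 - part1.py | reallocation
-- ===== SOURCE A (Python) =====
-- def reallocation(block):
--     resultArray = []
--     step = 0
--     tBlock = ()
--     while True:
--         redistributionAmount = max(block)
--         position = block.index(max(block))
--         block[position] = 0
--         while redistributionAmount > 0:
--             try:
--                 block[position+1] += 1
--             except:
--                 position = -1
--                 block[0] += 1
--             position += 1
--             redistributionAmount -= 1
--         step += 1
--         tBlock = tuple(block)
--         if tBlock in resultArray:
--             break
--         resultArray.append(tBlock)
--     return step
-- ===== SOURCE B (Python) =====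
-- def reallocation(block):
--     # Return-value equivalent to A; note A mutates its argument in place, B does not.
--     n = len(block)
--     seen = set()
--     steps = 0
--     state = tuple(block)
--     while True:
--         m = max(state)
--         p = state.index(m)
--         lst = list(state)
--         lst[p] = 0
--         if m > 0:
--             q, r = divmod(m, n)
--             lst = [v + q for v in lst]
--             for k in range(1, r + 1):
--                 lst[(p + k) % n] += 1
--         state = tuple(lst)
--         steps += 1
--         if state in seen:
--             return steps
--         seen.add(state)
-- ===== Notes on version B (the rewrite author's own statement) =====
-- stated objective: faster
-- what changed: A hands out the redistributed blocks one unit at a time (per-unit inner loop with try/except wraparound) and scans a growing list of seen states; B distributes each bank in O(n) with divmod arithmetic (everyone gets m//n, the m%n cyclic successors one extra) and keeps seen states in a hash set.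
-- outside the precondition, e.g. on reallocation([]): A raises ValueError, B raises ValueError
import Mathlib
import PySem

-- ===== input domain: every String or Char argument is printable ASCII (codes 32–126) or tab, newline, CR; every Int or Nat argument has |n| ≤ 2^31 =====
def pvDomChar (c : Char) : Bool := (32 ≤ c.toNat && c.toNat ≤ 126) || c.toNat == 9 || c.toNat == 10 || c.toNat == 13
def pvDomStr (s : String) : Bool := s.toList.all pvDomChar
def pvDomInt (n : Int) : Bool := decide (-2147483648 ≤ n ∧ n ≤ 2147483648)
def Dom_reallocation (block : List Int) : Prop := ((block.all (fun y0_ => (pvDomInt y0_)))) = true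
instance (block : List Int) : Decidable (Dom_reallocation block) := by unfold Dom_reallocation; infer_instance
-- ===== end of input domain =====

-- B replaces A's per-unit redistribution loop and list of seen states by a div/mod block
-- distribution and a set (faster); equivalence is about the RETURN value only — A mutates
-- its argument in place, B does not.

-- fuel bound making the unbounded Python 'while True' loops total; never reached in practice,
-- and the equivalence theorem holds at every fuel value, so nothing depends on its size.
def pvFuel : Nat := 2 ^ 64

-- ===== PORT A =====
-- inner 'while redistributionAmount > 0' loop: hand one unit to the next position,
-- wrapping to 0 where Python's IndexError/except fires (position+1 = len)
def reallocDistA (block : List Int) (pos amt : Int) : List Int :=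
  if _h : amt > 0 then
    if pos + 1 < (block.length : Int) then
      reallocDistA (PySem.List.pySetD block (pos + 1) (PySem.List.pyGetD block (pos + 1) 0 + 1))
        (pos + 1) (amt - 1)
    else
      -- except: position = -1; block[0] += 1; then position += 1 → 0
      reallocDistA (PySem.List.pySetD block 0 (PySem.List.pyGetD block 0 0 + 1)) 0 (amt - 1)
  else block
termination_by amt.toNat
decreasing_by all_goals omega

-- outer 'while True' loop carrying (block, resultArray, step)
def reallocLoopA : Nat → List Int → List (List Int) → Int → Int
  | 0, _, _, step => step
  | fuel + 1, block, resultArray, step =>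
    match PySem.List.max? block (fun y => y) with
    | none => step          -- max([]) raises ValueError: excluded by Pre_
    | some m =>
      match PySem.List.index? block m with
      | none => step        -- unreachable: max is a member
      | some pos =>
        let block1 := PySem.List.pySetD block (pos : Int) 0
        let block2 := reallocDistA block1 (pos : Int) m
        let step1 := step + 1
        if block2 ∈ resultArray then step1
        else reallocLoopA fuel block2 (resultArray ++ [block2]) step1

def reallocation (block : List Int) : Int :=
  reallocLoopA pvFuel block [] 0

-- ===== PORT B =====
-- arithmetic redistribution: everyone gets m // n, the r = m % n successors of p one extra
def reallocDistB (lst : List Int) (p n m : Int) : List Int :=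
  if m > 0 then
    let q := PySem.Int.floordiv m n
    let r := PySem.Int.mod m n
    let lst1 := lst.map (fun v => v + q)
    (PySem.List.pyRange 1 (r + 1) 1).foldl
      (fun l k =>
        PySem.List.pySetD l (PySem.Int.mod (p + k) n)
          (PySem.List.pyGetD l (PySem.Int.mod (p + k) n) 0 + 1)) lst1
  else lst

def reallocLoopB : Nat → Int → List Int → PySem.Set (List Int) → Int → Int
  | 0, _, _, _, steps => steps
  | fuel + 1, n, state, seen, steps =>
    match PySem.List.max? state (fun y => y) with
    | none => steps         -- max of empty tuple raises: excluded by Pre_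
    | some m =>
      match PySem.List.index? state m with
      | none => steps       -- unreachable
      | some p =>
        let lst := PySem.List.pySetD state (p : Int) 0
        let state1 := reallocDistB lst (p : Int) n m
        let steps1 := steps + 1
        if PySem.Set.contains seen state1 then steps1
        else reallocLoopB fuel n state1 (PySem.Set.add seen state1) steps1

def reallocation_alt (block : List Int) : Int :=
  reallocLoopB pvFuel (block.length : Int) block PySem.Set.empty 0

-- ===== PRECONDITION & SPEC =====
-- Pre_ excludes only the empty list, on which Python A raises ValueError (max of empty sequence).
def Pre_reallocation (block : List Int) : Prop := block ≠ []
instance (block : List Int) : Decidable (Pre_reallocation block) := by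
  unfold Pre_reallocation; infer_instance
def pvWitness_reallocation : List Int := [0, 2, 7, 0]
def Spec_reallocation (block : List Int) (out : Int) : Prop := out = reallocation_alt block
instance (block : List Int) (out : Int) : Decidable (Spec_reallocation block out) := by
  unfold Spec_reallocation; infer_instance

-- ===== CLAIM (what is proved, stated in full; the proofs are below) =====
def Claim_equal_reallocation : Prop :=
  ∀ (block : List Int), Dom_reallocation block → Pre_reallocation block →
    Spec_reallocation block (reallocation block)

-- ===== LEMMAS AND PROOFS =====

-- proof-side model of one unit hand-off: bump index i, state (list, position)
def pvBump (b : List Int) (i : Nat) : List Int := b.set i (b.getD i 0 + 1)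

def pvStep (s : List Int × Nat) : List Int × Nat :=
  if s.2 + 1 < s.1.length then (pvBump s.1 (s.2 + 1), s.2 + 1) else (pvBump s.1 0, 0)

-- the cyclic positions hit by m units starting after p, modulo n
def pvHits (p m n : Nat) : List Nat := (List.range m).map (fun k => (p + 1 + k) % n)

def pvFold (b : List Int) (l : List Nat) : List Int := l.foldl pvBump b

lemma length_pvBump (b : List Int) (i : Nat) : (pvBump b i).length = b.length := by
  simp [pvBump]

lemma length_pvFold (b : List Int) (l : List Nat) : (pvFold b l).length = b.length := by
  induction l generalizing b with
  | nil => rfl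
  | cons j l ih => simpa [pvFold, List.foldl_cons, length_pvBump] using ih (pvBump b j)

lemma length_iterate_pvStep (m : Nat) (s : List Int × Nat) :
    (pvStep^[m] s).1.length = s.1.length := by
  
  induction m with
  | zero => rfl
  | succ k ih =>
    have h1 : ∀ t : List Int × Nat, (pvStep t).1.length = t.1.length := by
      intro t; unfold pvStep; split <;> simp [length_pvBump]
    rw [Function.iterate_succ_apply', h1, ih]

-- A's inner loop is the m.toNat-fold iterate of pvStep
lemma distA_eq_run (m : Int) (b : List Int) (p : Nat) :
    reallocDistA b (p : Int) m = (pvStep^[m.toNat] (b, p)).1 := by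
  
  have main : ∀ (k : Nat) (m : Int), m.toNat = k → ∀ (b : List Int) (p : Nat),
      reallocDistA b (p : Int) m = (pvStep^[k] (b, p)).1 := by
    intro k
    induction k with
    | zero =>
      intro m hm b p
      rw [reallocDistA]
      have h0 : ¬ m > 0 := by omega
      simp [h0]
    | succ k ih =>
      intro m hm b p
      have hm0 : m > 0 := by omega
      have hm1 : (m - 1).toNat = k := by omega
      rw [reallocDistA, dif_pos hm0, Function.iterate_succ_apply]
      by_cases hlt : p + 1 < b.length
      · have hlt' : (p : Int) + 1 < (b.length : Int) := by exact_mod_cast hlt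
        rw [if_pos hlt']
        have hc : (p : Int) + 1 = ((p + 1 : Nat) : Int) := by push_cast; ring
        rw [hc, PySem.List.pySetD_natCast, PySem.List.pyGetD_natCast]
        have hstep : pvStep (b, p) = (pvBump b (p + 1), p + 1) := by
          unfold pvStep; simp [hlt, pvBump]
        rw [hstep, ← ih (m - 1) hm1]
        rfl
      · have hlt' : ¬ ((p : Int) + 1 < (b.length : Int)) := by
          intro h; exact hlt (by exact_mod_cast h)
        rw [if_neg hlt']
        have hc : (0 : Int) = ((0 : Nat) : Int) := by norm_num
        rw [hc, PySem.List.pySetD_natCast, PySem.List.pyGetD_natCast]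
        have hstep : pvStep (b, p) = (pvBump b 0, 0) := by
          unfold pvStep; simp [hlt, pvBump]
        rw [hstep, ← ih (m - 1) hm1]
        rfl
  exact main m.toNat m rfl b p

lemma pvStep_valid (b : List Int) (j : Nat) (hj : j < b.length) :
    pvStep (b, j) = (pvBump b ((j + 1) % b.length), (j + 1) % b.length) := by
  
  unfold pvStep
  by_cases h : j + 1 < b.length
  · simp [h, Nat.mod_eq_of_lt h]
  · have hj1 : j + 1 = b.length := by omega
    simp [hj1, Nat.mod_self]

-- closed form of the iterate
lemma run_formula (m : Nat) (b : List Int) (p : Nat) (hp : p < b.length) :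
    pvStep^[m] (b, p) = (pvFold b (pvHits p m b.length), (p + m) % b.length) := by
  
  induction m with
  | zero =>
    simp [pvHits, pvFold, Nat.mod_eq_of_lt hp]
  | succ m ih =>
    rw [Function.iterate_succ_apply', ih]
    have hn : 0 < b.length := by omega
    have hL : ((p + m) % b.length) < (pvFold b (pvHits p m b.length)).length := by
      rw [length_pvFold]; exact Nat.mod_lt _ hn
    have hv := pvStep_valid (pvFold b (pvHits p m b.length)) ((p + m) % b.length) hL
    rw [hv, length_pvFold]
    have hidx : ((p + m) % b.length + 1) % b.length = (p + (m + 1)) % b.length := by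
      rw [Nat.mod_add_mod, Nat.add_assoc]
    have hlist : pvHits p (m + 1) b.length = pvHits p m b.length ++ [(p + (m + 1)) % b.length] := by
      unfold pvHits
      rw [List.range_succ, List.map_append]
      simp only [List.map_cons, List.map_nil]
      rw [show p + 1 + m = p + (m + 1) from by omega]
    rw [hidx, hlist]
    unfold pvFold
    rw [List.foldl_append]
    simp only [List.foldl_cons, List.foldl_nil]

lemma pvFold_getD (l : List Nat) (b : List Int) (i : Nat) (hi : i < b.length) :
    (pvFold b l).getD i 0 = b.getD i 0 + l.count i := by
  
  induction l generalizing b with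
  | nil => simp [pvFold]
  | cons j l ih =>
    have hstep : pvFold b (j :: l) = pvFold (pvBump b j) l := rfl
    rw [hstep, ih (pvBump b j) (by simpa [length_pvBump] using hi)]
    have hbump : (pvBump b j).getD i 0 = if i = j then b.getD i 0 + 1 else b.getD i 0 := by
      unfold pvBump
      simp only [List.getD_eq_getElem?_getD, List.getElem?_set]
      by_cases hij : i = j
      · subst hij
        simp [hi]
      · simp [hij, Ne.symm hij]
    rw [hbump, List.count_cons]
    by_cases hij : i = j <;> simp [hij] <;> omega

lemma count_pvHits_full (p n i : Nat) (_hp : p < n) (hi : i < n) :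
    (pvHits p n n).count i = 1 := by
  
  have hn : 0 < n := by omega
  have hlen : (pvHits p n n).length = n := by simp [pvHits]
  have hmem : ∀ x ∈ pvHits p n n, x < n := by
    intro x hx
    simp only [pvHits, List.mem_map, List.mem_range] at hx
    obtain ⟨k, -, rfl⟩ := hx
    exact Nat.mod_lt _ hn
  have hnodup : (pvHits p n n).Nodup := by
    unfold pvHits
    apply List.Nodup.map_on ?_ (List.nodup_range)
    intro k1 h1 k2 h2 heq
    rw [List.mem_range] at h1 h2
    have hmeq : k1 ≡ k2 [MOD n] := Nat.ModEq.add_left_cancel' (p + 1) heq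
    have := hmeq
    unfold Nat.ModEq at this
    rw [Nat.mod_eq_of_lt h1, Nat.mod_eq_of_lt h2] at this
    exact this
  have hsub : (pvHits p n n).toFinset ⊆ Finset.range n := by
    intro x hx
    rw [List.mem_toFinset] at hx
    exact Finset.mem_range.mpr (hmem x hx)
  have hcard : (pvHits p n n).toFinset.card = n := by
    rw [List.toFinset_card_of_nodup hnodup, hlen]
  have heqf : (pvHits p n n).toFinset = Finset.range n :=
    Finset.eq_of_subset_of_card_le hsub (by simp [hcard])
  have hiL : i ∈ pvHits p n n := by
    rw [← List.mem_toFinset, heqf]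
    exact Finset.mem_range.mpr hi
  exact List.count_eq_one_of_mem hnodup hiL

-- one full cycle of n units adds 1 everywhere
lemma pvFold_full_cycle (b : List Int) (p : Nat) (hp : p < b.length) :
    pvFold b (pvHits p b.length b.length) = b.map (· + 1) := by
  
  apply List.ext_getElem (by simp [length_pvFold])
  intro i h1 h2
  have hi : i < b.length := by simpa [length_pvFold] using h1
  rw [← List.getD_eq_getElem _ (0 : Int) h1, pvFold_getD _ _ _ hi,
    count_pvHits_full p b.length i hp hi, List.getElem_map,
    List.getD_eq_getElem _ _ hi]
  push_cast
  ring

lemma pvHits_add_n (p s n : Nat) : pvHits p (n + s) n = pvHits p n n ++ pvHits p s n := by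
  
  unfold pvHits
  rw [List.range_add, List.map_append, List.map_map]
  congr 1
  apply List.map_congr_left
  intro k _
  show (p + 1 + (n + k)) % n = (p + 1 + k) % n
  have h : p + 1 + (n + k) = (p + 1 + k) + n := by omega
  rw [h, Nat.add_mod_right]

-- q full cycles then t remaining units
lemma pvFold_cycles (j : Nat) (t : Nat) (b : List Int) (p : Nat) (hp : p < b.length) :
    pvFold b (pvHits p (b.length * j + t) b.length) =
      pvFold (b.map (· + (j : Int))) (pvHits p t b.length) := by
  
  induction j generalizing b with
  | zero =>
    simp
  | succ j ih =>
    have h1 : b.length * (j + 1) + t = b.length + (b.length * j + t) := by ring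
    rw [h1, pvHits_add_n]
    unfold pvFold
    rw [List.foldl_append]
    have hc : List.foldl pvBump b (pvHits p b.length b.length) = b.map (· + 1) :=
      pvFold_full_cycle b p hp
    rw [hc]
    have hlen : (b.map (· + (1 : Int))).length = b.length := by simp
    have hp' : p < (b.map (· + (1 : Int))).length := by omega
    have := ih (b.map (· + 1)) hp'
    unfold pvFold at this
    rw [hlen] at this
    rw [this, List.map_map]
    congr 1
    apply List.map_congr_left
    intro v _
    simp only [Function.comp_apply]
    push_cast
    ring

-- B's arithmetic block equals the q-cycles-plus-remainder form
lemma distB_eq (b : List Int) (p : Nat) (_hp : p < b.length) (m : Int) (hm : m > 0) :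
    reallocDistB b (p : Int) (b.length : Int) m =
      pvFold (b.map (· + ((m.toNat / b.length : Nat) : Int))) (pvHits p (m.toNat % b.length) b.length) := by
  
  have hmN : m = ((m.toNat : Nat) : Int) := by omega
  have hq : PySem.Int.floordiv m (b.length : Int) = ((m.toNat / b.length : Nat) : Int) := by
    rw [hmN]; exact PySem.Int.floordiv_natCast _ _
  have hr : PySem.Int.mod m (b.length : Int) = ((m.toNat % b.length : Nat) : Int) := by
    rw [hmN]; exact PySem.Int.mod_natCast _ _
  have hrange : PySem.List.pyRange 1 (((m.toNat % b.length : Nat) : Int) + 1) 1 =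
      (List.range (m.toNat % b.length)).map (fun (k : Nat) => (1 : Int) + (k : Int)) := by
    rw [PySem.List.pyRange_one]
    have h11 : ((m.toNat % b.length : Nat) : Int) + 1 - 1 = ((m.toNat % b.length : Nat) : Int) := by
      ring
    rw [h11, Int.toNat_natCast]
  simp only [reallocDistB, if_pos hm, hq, hr, hrange, List.foldl_map]
  rw [pvFold, pvHits, List.foldl_map]
  apply PySem.List.foldl_congr_mem
  intro l k hk
  have hcast : (p : Int) + (1 + (k : Int)) = ((p + 1 + k : Nat) : Int) := by push_cast; ring
  rw [hcast, PySem.Int.mod_natCast, PySem.List.pySetD_natCast, PySem.List.pyGetD_natCast]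
  rfl

-- the inner loops agree
lemma dist_eq (b : List Int) (p : Nat) (hp : p < b.length) (m : Int) :
    reallocDistA b (p : Int) m = reallocDistB b (p : Int) (b.length : Int) m := by
  
  by_cases hm : m > 0
  · have hn : 0 < b.length := by omega
    rw [distA_eq_run, run_formula m.toNat b p hp]
    have hsplit : m.toNat = b.length * (m.toNat / b.length) + m.toNat % b.length :=
      (Nat.div_add_mod m.toNat b.length).symm
    conv_lhs => rw [hsplit]
    rw [pvFold_cycles (m.toNat / b.length) (m.toNat % b.length) b p hp]
    exact (distB_eq b p hp m hm).symm
  · rw [reallocDistA, dif_neg hm]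
    unfold reallocDistB
    rw [if_neg hm]

lemma length_distA (b : List Int) (p : Nat) (m : Int) :
    (reallocDistA b (p : Int) m).length = b.length := by
  rw [distA_eq_run]
  exact length_iterate_pvStep _ _

-- outer-loop bisimulation: same block, same seen list, same step counter
lemma loop_eq (fuel : Nat) (state : List Int) (seen : List (List Int)) (steps : Int)
    (hne : state ≠ []) :
    reallocLoopA fuel state seen steps = reallocLoopB fuel (state.length : Int) state seen steps := by
  
  induction fuel generalizing state seen steps with
  | zero => rfl
  | succ fuel ih =>
    have hmax : ∃ m, PySem.List.max? state (fun y => y) = some m := by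
      cases h : PySem.List.max? state (fun y => y) with
      | none => exact absurd ((PySem.List.max?_eq_none_iff state _).mp h) hne
      | some m => exact ⟨m, rfl⟩
    obtain ⟨m, hm⟩ := hmax
    have hmem : m ∈ state := PySem.List.max?_mem hm
    have hidx : ∃ p, PySem.List.index? state m = some p := by
      cases h : PySem.List.index? state m with
      | none =>
        have := (PySem.List.index?_isSome_iff state m).mpr hmem
        rw [h] at this; simp at this
      | some p => exact ⟨p, rfl⟩
    obtain ⟨p, hp⟩ := hidx
    obtain ⟨hplt, -, -⟩ := PySem.List.getElem_of_index?_eq_some hp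
    simp only [reallocLoopA, reallocLoopB, hm, hp]
    have hlen1 : (PySem.List.pySetD state (p : Int) 0).length = state.length := by
      rw [PySem.List.pySetD_natCast]; simp
    have hplt1 : p < (PySem.List.pySetD state (p : Int) 0).length := by omega
    have hdist := dist_eq (PySem.List.pySetD state (p : Int) 0) p hplt1 m
    rw [hlen1] at hdist
    rw [← hdist]
    set block2 := reallocDistA (PySem.List.pySetD state (p : Int) 0) (p : Int) m with hb2
    have hlen2 : block2.length = state.length := by
      rw [hb2, length_distA, hlen1]
    have hcont : PySem.Set.contains seen block2 = decide (block2 ∈ seen) := by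
      unfold PySem.Set.contains
      by_cases h : block2 ∈ seen <;> simp [h]
    by_cases hmem2 : block2 ∈ seen
    · simp [hmem2]
    · simp only [hmem2, if_false, hcont, decide_eq_true_eq]
      have hadd : PySem.Set.add seen block2 = seen ++ [block2] := by
        unfold PySem.Set.add
        rw [hcont]
        simp [hmem2]
      rw [hadd]
      have hne2 : block2 ≠ [] := by
        intro h
        rw [h] at hlen2
        exact hne (List.eq_nil_of_length_eq_zero hlen2.symm)
      have := ih block2 (seen ++ [block2]) (steps + 1) hne2
      rw [hlen2] at this
      exact this

-- ===== VERDICT (by name: the statement is the Claim_ definition above) =====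
theorem reallocation_spec : Claim_equal_reallocation := by
  intro block _ hpre
  unfold Spec_reallocation reallocation reallocation_alt
  exact loop_eq pvFuel block [] 0 hpre
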